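-- pv_equiv track=rewrite | github.com/acordobav/ARMv4-MessageDecoder | codificacion/xor_decode.py | xor_decode
-- ===== SOURCE A (Python) =====
-- def xor_decode(data, key):
--     decoded_data = '';
--     key_bit = 0;
--     words = data.split(' ');
--     for word in words:
--         for bit in word:
--             decoded_data += str(int(bit) ^ int(key[key_bit]));
--             key_bit += 1;
--         key_bit = 0;
--     return ''.join([chr(int(decoded_data[i:i+8], 2)) for i in range(0, len(decoded_data), 8)]);
-- ===== SOURCE B (Python) =====
-- def xor_decode(data, key):
--     out = []
--     buf = ''
--     for word in data.split(' '):
--         for i, ch in enumerate(word):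
--             buf += str(int(ch) ^ int(key[i]))
--             if len(buf) >= 8:
--                 out.append(chr(int(buf[:8], 2)))
--                 buf = buf[8:]
--     if buf:
--         out.append(chr(int(buf, 2)))
--     return ''.join(out)
-- ===== Notes on version B (the rewrite author's own statement) =====
-- stated objective: alternative
-- what changed: B fuses A's two phases into a single streaming pass: it keeps an 8-character bit buffer and emits each chr as soon as 8 decoded bit characters are available (flushing the short tail), instead of A's building of the whole decoded bit-string and then re-slicing it into 8-character groups with range/slice; Pre_ is exactly the closed-form condition under which A returns (each word no longer than the key, and each data/key character pair a pair of digits whose int-XOR writes only binary digits), outside it A raises ValueError or IndexError.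
import Mathlib
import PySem

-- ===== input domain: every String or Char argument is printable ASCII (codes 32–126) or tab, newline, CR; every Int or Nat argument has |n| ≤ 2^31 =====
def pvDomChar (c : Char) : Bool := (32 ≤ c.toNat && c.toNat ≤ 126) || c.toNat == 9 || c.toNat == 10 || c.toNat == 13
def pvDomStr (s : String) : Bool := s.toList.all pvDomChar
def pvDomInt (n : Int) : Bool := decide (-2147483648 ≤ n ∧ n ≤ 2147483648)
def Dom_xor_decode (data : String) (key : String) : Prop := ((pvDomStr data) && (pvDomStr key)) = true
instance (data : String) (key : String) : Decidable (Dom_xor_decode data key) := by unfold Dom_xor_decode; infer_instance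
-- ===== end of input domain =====

-- B fuses A's two phases (build the whole decoded bit-string, then re-slice it into groups of 8)
-- into one streaming pass with an 8-character buffer that emits each chr as soon as it is complete
-- (objective: alternative).

-- ===== PORT A =====
-- Python strings are ported as List Char; ''.join of one-character strings is String.mk of those
-- characters; chr(v) is Char.ofNat v.  The .getD defaults are only reached where the Python
-- raises (outside Pre_).
def xor_decode (data : String) (key : String) : String :=
  -- decoded_data = ''; key_bit = 0; words = data.split(' ')
  let words := PySem.Chars.splitOn data.toList [' ']
  -- for word in words: for bit in word: decoded_data += str(int(bit) ^ int(key[key_bit])); key_bit += 1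
  --                    key_bit = 0
  let st := words.foldl (fun (st : List Char × Int) w =>
      let st' := w.foldl (fun (p : List Char × Int) bit =>
          (p.1 ++ PySem.Int.toChars (PySem.Int.bxor
              ((PySem.Int.ofChars? [bit]).getD 0)
              ((PySem.Int.ofChars? [(PySem.Str.pyGet? key p.2).getD ' ']).getD 0)),
           p.2 + 1)) st
      (st'.1, (0 : Int))) ([], (0 : Int))
  let dd := st.1
  -- ''.join([chr(int(decoded_data[i:i+8], 2)) for i in range(0, len(decoded_data), 8)])
  String.mk ((PySem.List.pyRange 0 (dd.length : Int) 8).map (fun i =>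
      Char.ofNat ((PySem.Int.ofCharsBase? (PySem.List.slice dd (some i) (some (i + 8))) 2).getD 0).toNat))

-- ===== PORT B =====
-- Transliteration of Source B: state (out, buf); buf += str(int(ch) ^ int(key[i])); whenever
-- len(buf) >= 8 emit chr(int(buf[:8], 2)) and keep buf[8:]; flush the nonempty tail at the end.
def xor_decode_alt (data : String) (key : String) : String :=
  let st := (PySem.Chars.splitOn data.toList [' ']).foldl
    (fun (st : List Char × List Char) w =>
      (PySem.List.enumerate w 0).foldl (fun (st : List Char × List Char) p =>
        let buf := st.2 ++ PySem.Int.toChars (PySem.Int.bxor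
            ((PySem.Int.ofChars? [p.2]).getD 0)
            ((PySem.Int.ofChars? [(PySem.Str.pyGet? key p.1).getD ' ']).getD 0))
        if 8 ≤ buf.length then
          (st.1 ++ [Char.ofNat ((PySem.Int.ofCharsBase?
              (PySem.List.slice buf none (some 8)) 2).getD 0).toNat],
           PySem.List.slice buf (some 8) none)
        else (st.1, buf)) st)
    ([], [])
  String.mk (if st.2 ≠ [] then
      st.1 ++ [Char.ofNat ((PySem.Int.ofCharsBase? st.2 2).getD 0).toNat]
    else st.1)

-- ===== PRECONDITION & SPEC =====
-- a data character c against a key character k on which A's str(int(c) ^ int(k)) writes only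
-- binary digits: both are digits and the xor of their values is one of 0, 1, 10, 11
def pvOkPair (c k : Char) : Bool :=
  c.isDigit && k.isDigit &&
    (List.contains [0, 1, 10, 11] ((c.toNat - 48) ^^^ (k.toNat - 48)))

-- Pre_ is exactly the closed-form condition under which A returns: each word of data is no
-- longer than the key, and each positional (data, key) character pair is an ok digit pair.
-- Outside it A raises ValueError (int() on a non-digit or a non-binary group) or IndexError.
def Pre_xor_decode (data : String) (key : String) : Prop :=
  ∀ w ∈ PySem.Chars.splitOn data.toList [' '],
    w.length ≤ key.toList.length ∧ (List.zipWith pvOkPair w key.toList).all id = true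

instance (data : String) (key : String) : Decidable (Pre_xor_decode data key) := by
  unfold Pre_xor_decode; infer_instance

def pvWitness_xor_decode : String × String := ("98 23", "98")

def Spec_xor_decode (data : String) (key : String) (out : String) : Prop := out = xor_decode_alt data key
instance (data : String) (key : String) (out : String) : Decidable (Spec_xor_decode data key out) := by unfold Spec_xor_decode; infer_instance

-- ===== CLAIM (what is proved, stated in full; the proofs are below) =====
def Claim_equal_xor_decode : Prop := ∀ (data : String) (key : String), Dom_xor_decode data key → Pre_xor_decode data key → Spec_xor_decode data key (xor_decode data key)

-- ===== LEMMAS AND PROOFS =====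

-- the per-character string A appends and B buffers: str(int(c) ^ int(k))
def pvPiece (c k : Char) : List Char :=
  PySem.Int.toChars (PySem.Int.bxor ((PySem.Int.ofChars? [c]).getD 0)
    ((PySem.Int.ofChars? [k]).getD 0))

-- the stream of pieces a word contributes
def pvPieces (w ks : List Char) : List (List Char) := List.zipWith pvPiece w ks

-- B's buffer step and final flush, on an abstract piece
def pvChunkF (cs : List Char) : Char :=
  Char.ofNat ((PySem.Int.ofCharsBase? cs 2).getD 0).toNat

def pvPStep (st : List Char × List Char) (p : List Char) : List Char × List Char :=
  let buf := st.2 ++ p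
  if 8 ≤ buf.length then (st.1 ++ [pvChunkF (buf.take 8)], buf.drop 8) else (st.1, buf)

def pvPFlush (st : List Char × List Char) : List Char :=
  if st.2 ≠ [] then st.1 ++ [pvChunkF st.2] else st.1

-- A's final comprehension, as a structural recursion taking 8 characters at a time
def pvChunksC (l : List Char) : List Char :=
  if h : l = [] then [] else pvChunkF (l.take 8) :: pvChunksC (l.drop 8)
termination_by l.length
decreasing_by
  have : 0 < l.length := List.length_pos_of_ne_nil h
  simp [List.length_drop]; omega

theorem pvA_inner (key : String) (w : List Char) :
    ∀ (j : Nat) (s : List Char), j + w.length ≤ key.toList.length →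
    w.foldl (fun (p : List Char × Int) bit =>
          (p.1 ++ PySem.Int.toChars (PySem.Int.bxor
              ((PySem.Int.ofChars? [bit]).getD 0)
              ((PySem.Int.ofChars? [(PySem.Str.pyGet? key p.2).getD ' ']).getD 0)),
           p.2 + 1)) (s, (j : Int))
      = (s ++ (pvPieces w (key.toList.drop j)).flatten, ((j + w.length : Nat) : Int)) := by
  induction w with
  | nil => intro j s _; simp [pvPieces]
  | cons c cs ih =>
    intro j s hlen
    simp only [List.length_cons] at hlen
    have hj : j < key.toList.length := by omega
    have hget : (PySem.Str.pyGet? key (j : Int)).getD ' ' = key.toList[j] := by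
      simp [List.getElem?_eq_getElem hj]
    simp only [List.foldl_cons]
    rw [hget]
    rw [show ((j : Int) + 1) = ((j + 1 : Nat) : Int) by push_cast; ring]
    rw [ih (j + 1) _ (by omega)]
    simp [pvPieces, pvPiece, List.append_assoc]
    refine ⟨?_, by omega⟩
    conv_rhs => rw [show key.toList.drop j = key.toList[j] :: key.toList.drop (j + 1) from
      (List.getElem_cons_drop hj).symm]
    simp only [List.zipWith_cons_cons, List.flatten_cons, pvPiece]

theorem pvA_decoded (key : String) (words : List (List Char))
    (hw : ∀ w ∈ words, w.length ≤ key.toList.length) :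
    ∀ (s : List Char),
    words.foldl (fun (st : List Char × Int) w =>
      let st' := w.foldl (fun (p : List Char × Int) bit =>
          (p.1 ++ PySem.Int.toChars (PySem.Int.bxor
              ((PySem.Int.ofChars? [bit]).getD 0)
              ((PySem.Int.ofChars? [(PySem.Str.pyGet? key p.2).getD ' ']).getD 0)),
           p.2 + 1)) st
      (st'.1, (0 : Int))) (s, (0 : Int))
      = (s ++ ((words.map (fun w => pvPieces w key.toList)).flatten).flatten, (0 : Int)) := by
  induction words with
  | nil => intro s; simp
  | cons w ws ih =>
    intro s
    simp only [List.foldl_cons]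
    have h0 := pvA_inner key w 0 s (by simpa using hw w (List.mem_cons_self ..))
    simp only [Nat.cast_zero, List.drop_zero, zero_add] at h0
    rw [h0]
    rw [ih (fun u hu => hw u (List.mem_cons_of_mem _ hu)) (s ++ (pvPieces w key.toList).flatten)]
    simp [List.append_assoc]

theorem pvB_inner (key : String) (w : List Char) :
    ∀ (j : Nat) (st : List Char × List Char), j + w.length ≤ key.toList.length →
    (PySem.List.enumerate w (j : Int)).foldl (fun (st : List Char × List Char) p =>
        let buf := st.2 ++ PySem.Int.toChars (PySem.Int.bxor
            ((PySem.Int.ofChars? [p.2]).getD 0)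
            ((PySem.Int.ofChars? [(PySem.Str.pyGet? key p.1).getD ' ']).getD 0))
        if 8 ≤ buf.length then
          (st.1 ++ [Char.ofNat ((PySem.Int.ofCharsBase?
              (PySem.List.slice buf none (some 8)) 2).getD 0).toNat],
           PySem.List.slice buf (some 8) none)
        else (st.1, buf)) st
      = (pvPieces w (key.toList.drop j)).foldl pvPStep st := by
  induction w with
  | nil => intro j st _; simp [PySem.List.enumerate_nil, pvPieces]
  | cons c cs ih =>
    intro j st hlen
    simp only [List.length_cons] at hlen
    have hj : j < key.toList.length := by omega
    have hget : (PySem.Str.pyGet? key (j : Int)).getD ' ' = key.toList[j] := by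
      simp [List.getElem?_eq_getElem hj]
    rw [PySem.List.enumerate_cons]
    simp only [List.foldl_cons]
    rw [hget]
    rw [show ((j : Int) + 1) = ((j + 1 : Nat) : Int) by push_cast; ring]
    rw [ih (j + 1) _ (by omega)]
    conv_rhs => rw [show key.toList.drop j = key.toList[j] :: key.toList.drop (j + 1) from
      (List.getElem_cons_drop hj).symm]
    simp only [pvPieces, List.zipWith_cons_cons, List.foldl_cons]
    congr 1
    -- the port's slice-based step is pvPStep on the piece
    simp only [pvPStep, pvPiece, pvChunkF]
    rw [PySem.List.slice_to _ (show (0 : Int) ≤ 8 by norm_num),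
        PySem.List.slice_from _ (show (0 : Int) ≤ 8 by norm_num)]
    rfl

theorem pvB_decoded (key : String) (words : List (List Char))
    (hw : ∀ w ∈ words, w.length ≤ key.toList.length) :
    ∀ (st : List Char × List Char),
    words.foldl (fun (st : List Char × List Char) w =>
      (PySem.List.enumerate w 0).foldl (fun (st : List Char × List Char) p =>
        let buf := st.2 ++ PySem.Int.toChars (PySem.Int.bxor
            ((PySem.Int.ofChars? [p.2]).getD 0)
            ((PySem.Int.ofChars? [(PySem.Str.pyGet? key p.1).getD ' ']).getD 0))
        if 8 ≤ buf.length then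
          (st.1 ++ [Char.ofNat ((PySem.Int.ofCharsBase?
              (PySem.List.slice buf none (some 8)) 2).getD 0).toNat],
           PySem.List.slice buf (some 8) none)
        else (st.1, buf)) st) st
      = ((words.map (fun w => pvPieces w key.toList)).flatten).foldl pvPStep st := by
  induction words with
  | nil => intro st; simp
  | cons w ws ih =>
    intro st
    simp only [List.foldl_cons]
    have h0 := pvB_inner key w 0 st (by simpa using hw w (List.mem_cons_self ..))
    simp only [Nat.cast_zero, List.drop_zero] at h0
    rw [h0]
    rw [ih (fun u hu => hw u (List.mem_cons_of_mem _ hu))]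
    simp [List.foldl_append]

-- the buffered fold with a final flush computes exactly the chunks of 8
theorem pvPStream : ∀ (ps : List (List Char)) (buf : List Char) (out : List Char),
    buf.length < 8 → (∀ p ∈ ps, p.length ≤ 8) →
    pvPFlush (ps.foldl pvPStep (out, buf)) = out ++ pvChunksC (buf ++ ps.flatten) := by
  intro ps
  induction ps with
  | nil =>
    intro buf out hbuf _
    cases buf with
    | nil => simp [pvPFlush, pvChunksC]
    | cons b bs =>
      simp only [List.flatten_nil, List.append_nil, List.foldl_nil]
      rw [pvChunksC, dif_neg (by simp : (b :: bs) ≠ [])]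
      rw [List.take_of_length_le (le_of_lt hbuf), List.drop_eq_nil_of_le (le_of_lt hbuf)]
      simp [pvPFlush, pvChunksC]
  | cons p ps ih =>
    intro buf out hbuf hps
    simp only [List.foldl_cons]
    have hp : p.length ≤ 8 := hps p (List.mem_cons_self ..)
    have hps' : ∀ q ∈ ps, q.length ≤ 8 := fun q hq => hps q (List.mem_cons_of_mem _ hq)
    by_cases h8 : 8 ≤ (buf ++ p).length
    · rw [show pvPStep (out, buf) p
          = (out ++ [pvChunkF ((buf ++ p).take 8)], (buf ++ p).drop 8) from by
        simp only [pvPStep]; rw [if_pos h8]]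
      rw [ih ((buf ++ p).drop 8) _ (by
        simp only [List.length_drop, List.length_append]
        simp only [List.length_append] at h8
        omega) hps']
      rw [show buf ++ (p :: ps).flatten = (buf ++ p) ++ ps.flatten from by simp]
      conv_rhs => rw [pvChunksC, dif_neg (by
        apply List.ne_nil_of_length_pos
        simp only [List.length_append]
        simp only [List.length_append] at h8
        omega)]
      rw [List.take_append_of_le_length h8, List.drop_append_of_le_length h8]
      simp
    · rw [show pvPStep (out, buf) p = (out, buf ++ p) from by
        simp only [pvPStep]; rw [if_neg h8]]
      rw [ih (buf ++ p) out (by simp at h8 ⊢; omega) hps']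
      simp

-- on an ok digit pair the appended piece has at most 8 characters
theorem pvPiece_len (c k : Char) (h : pvOkPair c k = true) : (pvPiece c k).length ≤ 8 := by
  simp only [pvOkPair, Bool.and_eq_true] at h
  obtain ⟨⟨hcd, hkd⟩, -⟩ := h
  have hc : 48 ≤ c.toNat ∧ c.toNat ≤ 57 := by
    simpa [Char.isDigit, UInt32.le_iff_toNat_le] using hcd
  have hk : 48 ≤ k.toNat ∧ k.toNat ≤ 57 := by
    simpa [Char.isDigit, UInt32.le_iff_toNat_le] using hkd
  rw [← Char.ofNat_toNat c, ← Char.ofNat_toNat k]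
  obtain ⟨hc1, hc2⟩ := hc
  obtain ⟨hk1, hk2⟩ := hk
  interval_cases h1 : c.toNat <;> interval_cases h2 : k.toNat <;> decide

-- auxiliary: pieces of w against ks are short when every pair is ok
theorem pvZip_len (w : List Char) : ∀ (ks : List Char),
    (List.zipWith pvOkPair w ks).all id = true →
    ∀ p ∈ List.zipWith pvPiece w ks, p.length ≤ 8 := by
  induction w with
  | nil => intro ks _ p hp; simp at hp
  | cons c cs ih =>
    intro ks hz p hp
    cases ks with
    | nil => simp at hp
    | cons k ks =>
      simp only [List.zipWith_cons_cons, List.all_cons, Bool.and_eq_true, id] at hz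
      simp only [List.zipWith_cons_cons, List.mem_cons] at hp
      rcases hp with rfl | hp
      · exact pvPiece_len c k hz.1
      · exact ih ks hz.2 p hp

theorem pvPieces_len (key : String) (words : List (List Char))
    (hok : ∀ w ∈ words, (List.zipWith pvOkPair w key.toList).all id = true) :
    ∀ p ∈ (words.map (fun w => pvPieces w key.toList)).flatten, p.length ≤ 8 := by
  intro p hp
  rw [List.mem_flatten] at hp
  obtain ⟨l, hl, hpl⟩ := hp
  rw [List.mem_map] at hl
  obtain ⟨w, hw, rfl⟩ := hl
  exact pvZip_len w key.toList (hok w hw) p hpl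

-- A's comprehension over range(0, len, 8) is the structural chunk recursion
theorem pvRange_chunks : ∀ (N : Nat) (cs : List Char), (cs.length + 7) / 8 = N →
    (List.range N).map ((fun i =>
      Char.ofNat ((PySem.Int.ofCharsBase? (PySem.List.slice cs (some i) (some (i + 8))) 2).getD 0).toNat)
        ∘ (fun k : Nat => (0 : Int) + 8 * (k : Int))) = pvChunksC cs := by
  intro N
  induction N with
  | zero =>
    intro cs hN
    have : cs = [] := List.eq_nil_of_length_eq_zero (by omega)
    simp [this, pvChunksC]
  | succ N ih =>
    intro cs hN
    have hlen : 0 < cs.length := by omega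
    have hne : cs ≠ [] := List.ne_nil_of_length_pos hlen
    rw [List.range_succ_eq_map, List.map_cons, List.map_map]
    have hhead : ((fun i =>
        Char.ofNat ((PySem.Int.ofCharsBase? (PySem.List.slice cs (some i) (some (i + 8))) 2).getD 0).toNat)
          ∘ (fun k : Nat => (0 : Int) + 8 * (k : Int))) 0
        = Char.ofNat ((PySem.Int.ofCharsBase? (cs.take 8) 2).getD 0).toNat := by
      simp only [Function.comp_apply, Nat.cast_zero, mul_zero, zero_add]
      rw [PySem.List.slice_toNat cs (by norm_num) (by norm_num)]
      norm_num
      rfl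
    have htail : ∀ k ∈ List.range N,
        (((fun i =>
          Char.ofNat ((PySem.Int.ofCharsBase? (PySem.List.slice cs (some i) (some (i + 8))) 2).getD 0).toNat)
            ∘ (fun k : Nat => (0 : Int) + 8 * (k : Int))) ∘ Nat.succ) k
        = ((fun i =>
          Char.ofNat ((PySem.Int.ofCharsBase? (PySem.List.slice (cs.drop 8) (some i) (some (i + 8))) 2).getD 0).toNat)
            ∘ (fun k : Nat => (0 : Int) + 8 * (k : Int))) k := by
      intro k _
      simp only [Function.comp_apply]
      rw [PySem.List.slice_toNat cs (by positivity) (by positivity),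
          PySem.List.slice_toNat (cs.drop 8) (by positivity) (by positivity)]
      rw [List.drop_drop]
      have e1 : ((0 : Int) + 8 * (k.succ : Int) + 8).toNat - ((0 : Int) + 8 * (k.succ : Int)).toNat
          = ((0 : Int) + 8 * (k : Int) + 8).toNat - ((0 : Int) + 8 * (k : Int)).toNat := by omega
      have e2 : ((0 : Int) + 8 * (k.succ : Int)).toNat = 8 + ((0 : Int) + 8 * (k : Int)).toNat := by omega
      rw [e1, e2]
    rw [hhead, List.map_congr_left htail, ih (cs.drop 8) (by simp [List.length_drop]; omega)]
    conv_rhs => rw [pvChunksC, dif_neg hne]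
    rfl

theorem pvA_chunks (cs : List Char) :
    (PySem.List.pyRange 0 (cs.length : Int) 8).map (fun i =>
      Char.ofNat ((PySem.Int.ofCharsBase? (PySem.List.slice cs (some i) (some (i + 8))) 2).getD 0).toNat)
      = pvChunksC cs := by
  rw [PySem.List.pyRange_of_pos _ _ (by norm_num : (0 : Int) < 8), List.map_map]
  have hN : (if (0 : Int) < (cs.length : Int) then (((cs.length : Int) - 0 + 8 - 1) / 8).toNat else 0)
      = (cs.length + 7) / 8 := by
    have hc : ((0 : Int) < (cs.length : Int)) ↔ 0 < cs.length := by exact_mod_cast Iff.rfl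
    by_cases h : 0 < cs.length
    · rw [if_pos (hc.mpr h)]; omega
    · rw [if_neg (fun hh => h (hc.mp hh))]; omega
  rw [hN]
  exact pvRange_chunks ((cs.length + 7) / 8) cs rfl

-- ===== VERDICT (by name: the statement is the Claim_ definition above) =====
theorem xor_decode_spec : Claim_equal_xor_decode := by
  intro data key _ hpre
  unfold Spec_xor_decode
  have hw : ∀ w ∈ PySem.Chars.splitOn data.toList [' '], w.length ≤ key.toList.length :=
    fun w h => (hpre w h).1
  have hok : ∀ w ∈ PySem.Chars.splitOn data.toList [' '],
      (List.zipWith pvOkPair w key.toList).all id = true := fun w h => (hpre w h).2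
  have eA : xor_decode data key
      = String.mk (pvChunksC ((((PySem.Chars.splitOn data.toList [' ']).map
          (fun w => pvPieces w key.toList)).flatten).flatten)) := by
    simp only [xor_decode]
    rw [pvA_decoded key (PySem.Chars.splitOn data.toList [' ']) hw []]
    simp only [List.nil_append]
    rw [pvA_chunks]
  have eB : xor_decode_alt data key
      = String.mk (pvChunksC ((((PySem.Chars.splitOn data.toList [' ']).map
          (fun w => pvPieces w key.toList)).flatten).flatten)) := by
    simp only [xor_decode_alt]
    rw [pvB_decoded key (PySem.Chars.splitOn data.toList [' ']) hw ([], [])]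
    have h := pvPStream (((PySem.Chars.splitOn data.toList [' ']).map
        (fun w => pvPieces w key.toList)).flatten) [] [] (by norm_num)
        (pvPieces_len key (PySem.Chars.splitOn data.toList [' ']) hok)
    simp only [List.nil_append] at h
    rw [← h]
    rfl
  rw [eA, eB]
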